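-- pv_equiv track=rewrite | github.com/WojciechL02/Zbior-zadan-CKE | Programowanie/78 - zrobione/zadanie78.py | skrot
-- ===== SOURCE A (Python) =====
-- def skrot(w):
--     S = [ord(Z) for Z in "ALGORYTM"]
--     while len(w) % 8 != 0:
--         w += "."
--     a = len(w)
--     p = 0
--     k = 7
--     while k <= len(w):
--         w1 = w[p:k+1]
--         for j in range(8):
--             S[j] = (S[j] + ord(w1[j])) % 128
--         p += 8
--         k += 8
--     wynik = ""
--     for i in range(8):
--         wynik = wynik + chr(65 + S[i] % 26)
--     return a, S, wynik
-- ===== SOURCE B (Python) =====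
-- def skrot(w):
--     w = w + "." * (-len(w) % 8)
--     a = len(w)
--     S = [(ord(z) + sum(ord(w[i]) for i in range(j, a, 8))) % 128
--          for j, z in enumerate("ALGORYTM")]
--     wynik = "".join(chr(65 + s % 26) for s in S)
--     return a, S, wynik
-- ===== Notes on version B (the rewrite author's own statement) =====
-- stated objective: alternative
-- what changed: replaces the pointer-driven block-major while loop (slice each 8-char block, add it into S in place, incremental mod) with closed-form padding and a column-major comprehension: each S[j] is computed independently as one stride sum over positions j, j+8, ... with a single final mod, and wynik is a join instead of repeated concatenation
import Mathlib
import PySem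

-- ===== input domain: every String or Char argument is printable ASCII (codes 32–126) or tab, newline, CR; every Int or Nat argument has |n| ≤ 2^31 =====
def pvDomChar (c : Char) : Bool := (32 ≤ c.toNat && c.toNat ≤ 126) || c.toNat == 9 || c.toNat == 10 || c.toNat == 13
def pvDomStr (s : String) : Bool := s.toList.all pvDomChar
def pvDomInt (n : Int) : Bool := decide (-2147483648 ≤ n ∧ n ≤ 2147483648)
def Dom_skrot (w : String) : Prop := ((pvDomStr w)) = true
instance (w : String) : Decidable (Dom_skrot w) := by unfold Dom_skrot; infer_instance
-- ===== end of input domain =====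

-- B replaces A's pointer-driven block-major while loop (slice each 8-char block into S with an
-- incremental mod) by closed-form padding plus a column-major construction: each S[j] is one
-- stride sum over positions j, j+8, … with a single final mod; wynik is a join, not a concat loop.

-- ===== PORT A =====
-- while len(w) % 8 != 0: w += "."
def skrotPad (w : List Char) : List Char :=
  if w.length % 8 ≠ 0 then skrotPad (w ++ ['.']) else w
termination_by (8 - w.length % 8) % 8
decreasing_by simp_all; omega

-- while k <= len(w): w1 = w[p:k+1]; for j in range(8): S[j] = (S[j] + ord(w1[j])) % 128; p += 8; k += 8
def skrotBlocks (w : List Char) (S : List Int) (p k : Nat) : List Int :=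
  if k ≤ w.length then
    let w1 := PySem.List.slice w (some (p : Int)) (some ((k : Int) + 1))
    let S' := (List.range 8).foldl
      (fun S j => S.set j (PySem.Int.mod (S.getD j 0 + ((w1.getD j ' ').toNat : Int)) 128)) S
    skrotBlocks w S' (p + 8) (k + 8)
  else S
termination_by w.length + 1 - k
decreasing_by omega

def skrot (w : String) : Int × List Int × String :=
  let S := "ALGORYTM".toList.map (fun Z => ((Z.toNat : Int)))
  let wl := skrotPad w.toList
  let a : Int := wl.length
  let Sf := skrotBlocks wl S 0 7
  let wynik := (List.range 8).foldl
    (fun acc i => acc ++ String.singleton (Char.ofNat (65 + PySem.Int.mod (Sf.getD i 0) 26).toNat)) ""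
  (a, Sf, wynik)

-- ===== PORT B =====
def skrot_alt (w : String) : Int × List Int × String :=
  let wl := w.toList ++ List.replicate (PySem.Int.mod (-(w.toList.length : Int)) 8).toNat '.'
  let a : Int := wl.length
  let S := (PySem.List.enumerate "ALGORYTM".toList).map
    (fun jz => PySem.Int.mod ((jz.2.toNat : Int) +
      ((PySem.List.pyRange jz.1 a 8).map (fun i => ((PySem.List.pyGetD wl i ' ').toNat : Int))).sum) 128)
  let wynik := PySem.Str.join ""
    (S.map (fun s => String.singleton (Char.ofNat (65 + PySem.Int.mod s 26).toNat)))
  (a, S, wynik)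

-- ===== PRECONDITION & SPEC =====
def Spec_skrot (w : String) (out : Int × List Int × String) : Prop := out = skrot_alt w
instance (w : String) (out : Int × List Int × String) : Decidable (Spec_skrot w out) := by unfold Spec_skrot; infer_instance

-- ===== CLAIM (what is proved, stated in full; the proofs are below) =====
def Claim_equal_skrot : Prop := ∀ (w : String), Dom_skrot w → Spec_skrot w (skrot w)

-- ===== LEMMAS AND PROOFS =====

-- sum of the character codes at positions 0, 8, 16, … of u (proof-only helper)
def strideSum (u : List Char) : Int :=
  match u with
  | [] => 0
  | c :: rest => (c.toNat : Int) + strideSum (rest.drop 7)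
termination_by u.length
decreasing_by simp

theorem pad_eq (u : List Char) :
    skrotPad u = u ++ List.replicate ((8 - u.length % 8) % 8) '.' := by
  fun_induction skrotPad u with
  | case1 u h ih =>
      rw [ih]
      have : (8 - u.length % 8) % 8 = ((8 - (u ++ ['.']).length % 8) % 8) + 1 := by
        simp; omega
      rw [this, List.append_assoc]
      simp [List.replicate_succ]
  | case2 u h => simp_all

theorem strideSum_append (b v : List Char) (j : Nat) (hb : b.length = 8) (hj : j < 8) :
    strideSum ((b ++ v).drop j) = ((b.getD j ' ').toNat : Int) + strideSum (v.drop j) := by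
  rcases b with _|⟨c0,_|⟨c1,_|⟨c2,_|⟨c3,_|⟨c4,_|⟨c5,_|⟨c6,_|⟨c7,_|⟨c8,b⟩⟩⟩⟩⟩⟩⟩⟩⟩ <;> simp_all
  interval_cases j <;> simp [strideSum]

theorem strideSum_eq_colSum (n : Nat) (u : List Char) (j : Nat)
    (hu : u.length = 8 * n) (hj : j < 8) :
    strideSum (u.drop j) =
      ((List.range n).map (fun k => ((u.getD (j + 8 * k) ' ').toNat : Int))).sum := by
  induction n generalizing u with
  | zero =>
      have : u = [] := by simpa using hu
      subst this; simp [strideSum]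
  | succ n ih =>
      have hsplit : u = u.take 8 ++ u.drop 8 := by simp
      have hb : (u.take 8).length = 8 := by simp; omega
      have hv : (u.drop 8).length = 8 * n := by simp; omega
      rw [hsplit, strideSum_append _ _ j hb hj, ih _ hv]
      rw [List.range_succ_eq_map]
      simp only [List.map_cons, List.map_map, List.sum_cons]
      congr 1
      · congr 1
        norm_num [List.getElem?_take_of_lt hj]
      · apply congrArg
        apply List.map_congr_left
        intro k hk
        simp only [Function.comp, Nat.succ_eq_add_one]
        have h2 : j + 8 * (k + 1) = 8 + (j + 8 * k) := by omega
        rw [← hsplit, h2, List.getD, List.getD, List.getElem?_drop]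

theorem innerFold (w1 : List Char) (s0 s1 s2 s3 s4 s5 s6 s7 : Int) :
    (List.range 8).foldl
      (fun S j => S.set j (PySem.Int.mod (S.getD j 0 + ((w1.getD j ' ').toNat : Int)) 128))
      [s0, s1, s2, s3, s4, s5, s6, s7] =
    [PySem.Int.mod (s0 + ((w1.getD 0 ' ').toNat : Int)) 128,
     PySem.Int.mod (s1 + ((w1.getD 1 ' ').toNat : Int)) 128,
     PySem.Int.mod (s2 + ((w1.getD 2 ' ').toNat : Int)) 128,
     PySem.Int.mod (s3 + ((w1.getD 3 ' ').toNat : Int)) 128,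
     PySem.Int.mod (s4 + ((w1.getD 4 ' ').toNat : Int)) 128,
     PySem.Int.mod (s5 + ((w1.getD 5 ' ').toNat : Int)) 128,
     PySem.Int.mod (s6 + ((w1.getD 6 ' ').toNat : Int)) 128,
     PySem.Int.mod (s7 + ((w1.getD 7 ' ').toNat : Int)) 128] := rfl

theorem blocks_eq (n : Nat) (w : List Char) (S : List Int) (p : Nat)
    (hw : w.length = p + 8 * n) (hS : S.length = 8)
    (hmod : ∀ j, PySem.Int.mod (S.getD j 0) 128 = S.getD j 0) :
    skrotBlocks w S p (p + 7) =
      (List.range 8).map (fun j => PySem.Int.mod (S.getD j 0 + strideSum ((w.drop p).drop j)) 128) := by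
  induction n generalizing S p with
  | zero =>
      rw [skrotBlocks, if_neg (by omega)]
      have hd : w.drop p = [] := by rw [List.drop_eq_nil_iff]; omega
      rw [hd]
      rcases S with _|⟨s0,_|⟨s1,_|⟨s2,_|⟨s3,_|⟨s4,_|⟨s5,_|⟨s6,_|⟨s7,_|⟨s8,S⟩⟩⟩⟩⟩⟩⟩⟩⟩ <;> simp_all [strideSum, List.range_succ]
  | succ n ih =>
      have hle : p + 7 ≤ w.length := by omega
      have hbl : ((w.drop p).take 8).length = 8 := by simp; omega
      have hw1 : PySem.List.slice w (some (p : Int)) (some ((↑(p + 7) : Int) + 1))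
          = (w.drop p).take 8 := by
        have hc : ((p + 7 : Nat) : Int) + 1 = (p : Int) + ((8 : Nat) : Int) := by push_cast; ring
        rw [hc, PySem.List.slice_natCast_add]
      rw [skrotBlocks, if_pos hle]
      simp only [hw1]
      generalize hb : (w.drop p).take 8 = b at *
      rcases S with _|⟨s0,_|⟨s1,_|⟨s2,_|⟨s3,_|⟨s4,_|⟨s5,_|⟨s6,_|⟨s7,_|⟨s8,S⟩⟩⟩⟩⟩⟩⟩⟩⟩ <;> try simp at hS
      rw [innerFold]
      have hk : p + 7 + 8 = (p + 8) + 7 := by omega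
      rw [hk, ih
        [PySem.Int.mod (s0 + ((b.getD 0 ' ').toNat : Int)) 128,
         PySem.Int.mod (s1 + ((b.getD 1 ' ').toNat : Int)) 128,
         PySem.Int.mod (s2 + ((b.getD 2 ' ').toNat : Int)) 128,
         PySem.Int.mod (s3 + ((b.getD 3 ' ').toNat : Int)) 128,
         PySem.Int.mod (s4 + ((b.getD 4 ' ').toNat : Int)) 128,
         PySem.Int.mod (s5 + ((b.getD 5 ' ').toNat : Int)) 128,
         PySem.Int.mod (s6 + ((b.getD 6 ' ').toNat : Int)) 128,
         PySem.Int.mod (s7 + ((b.getD 7 ' ').toNat : Int)) 128]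
        (p + 8) (by omega) (by simp) (by
        intro j
        rcases j with _|_|_|_|_|_|_|_|j <;> simp [List.getD])]
      apply List.map_congr_left
      intro j hj
      have hj8 : j < 8 := List.mem_range.mp hj
      have hsplit : w.drop p = b ++ ((w.drop p).drop 8) := by rw [← hb]; simp
      have hdd : (w.drop (p + 8)) = (w.drop p).drop 8 := by
        rw [List.drop_drop]
      conv_rhs => rw [hsplit]
      rw [strideSum_append _ _ j hbl hj8]
      interval_cases j <;> simp [List.getD] <;> omega

theorem pyRange_col (j n : Nat) (hj : j < 8) :
    PySem.List.pyRange (j : Int) ((8 * n : Nat) : Int) 8 =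
      (List.range n).map (fun (k : Nat) => ((j : Int) + 8 * (k : Int))) := by
  rw [PySem.List.pyRange_of_pos _ _ (by norm_num : (0:Int) < 8)]
  by_cases hn : n = 0
  · subst hn; simp
  · rw [if_pos (by push_cast; omega)]
    have hc : ((((8 * n : Nat) : Int) - (j : Int) + 8 - 1) / 8) = (n : Int) := by
      push_cast; omega
    rw [hc]
    simp only [Int.toNat_natCast]

theorem colSum_eq (wl : List Char) (n j : Nat) (hl : wl.length = 8 * n) (hj : j < 8) :
    ((PySem.List.pyRange (j : Int) ((wl.length : Int)) 8).map
      (fun i => ((PySem.List.pyGetD wl i ' ').toNat : Int))).sum = strideSum (wl.drop j) := by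
  rw [hl, pyRange_col j n hj, List.map_map, strideSum_eq_colSum n wl j hl hj]
  congr 1
  apply List.map_congr_left
  intro k hk
  have hc : (j : Int) + 8 * (k : Int) = ((j + 8 * k : Nat) : Int) := by push_cast; ring
  simp only [Function.comp_apply]
  rw [hc, PySem.List.pyGetD_natCast]

theorem padCount (L : Nat) : (PySem.Int.mod (-(L : Int)) 8).toNat = (8 - L % 8) % 8 := by
  simp [PySem.Int.mod, Int.fmod_eq_emod]
  omega

theorem blocks_eq0 (n : Nat) (w : List Char) (S : List Int)
    (hw : w.length = 8 * n) (hS : S.length = 8)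
    (hmod : ∀ j, PySem.Int.mod (S.getD j 0) 128 = S.getD j 0) :
    skrotBlocks w S 0 7 =
      (List.range 8).map (fun j => PySem.Int.mod (S.getD j 0 + strideSum (w.drop j)) 128) := by
  have h := blocks_eq n w S 0 (by omega) hS hmod
  simpa using h

theorem skrot_eq (w : String) : skrot w = skrot_alt w := by
  unfold skrot skrot_alt
  rw [pad_eq, padCount]
  set L := w.toList with hL
  set wl := L ++ List.replicate ((8 - L.length % 8) % 8) '.' with hwl
  obtain ⟨n, hn⟩ : ∃ n, wl.length = 8 * n := ⟨wl.length / 8, by simp [hwl]; omega⟩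
  dsimp only
  have hA : "ALGORYTM".toList = ['A','L','G','O','R','Y','T','M'] := by decide
  have hE : PySem.List.enumerate ['A','L','G','O','R','Y','T','M'] =
      [(0,'A'),(1,'L'),(2,'G'),(3,'O'),(4,'R'),(5,'Y'),(6,'T'),(7,'M')] := by decide
  have hM : List.map (fun (Z : Char) => ((Z.toNat : Int))) ['A','L','G','O','R','Y','T','M'] =
      [65,76,71,79,82,89,84,77] := by decide
  rw [hA, hE, hM]
  rw [blocks_eq0 n wl _ hn (by norm_num) (by
    intro j
    rcases j with _|_|_|_|_|_|_|_|j <;> simp [List.getD])]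
  have h0 := colSum_eq wl n 0 hn (by norm_num)
  have h1 := colSum_eq wl n 1 hn (by norm_num)
  have h2 := colSum_eq wl n 2 hn (by norm_num)
  have h3 := colSum_eq wl n 3 hn (by norm_num)
  have h4 := colSum_eq wl n 4 hn (by norm_num)
  have h5 := colSum_eq wl n 5 hn (by norm_num)
  have h6 := colSum_eq wl n 6 hn (by norm_num)
  have h7 := colSum_eq wl n 7 hn (by norm_num)
  push_cast at h0 h1 h2 h3 h4 h5 h6 h7
  simp only [List.range_succ, List.range_zero, List.map_nil, List.map_cons,
    List.nil_append, List.cons_append, List.getD, List.getElem?_cons_zero, List.getElem?_cons_succ,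
    Option.getD_some, List.drop_zero]
  rw [h0, h1, h2, h3, h4, h5, h6, h7]
  simp only [show (('A'.toNat : Int)) = 65 from rfl, show (('L'.toNat : Int)) = 76 from rfl,
    show (('G'.toNat : Int)) = 71 from rfl, show (('O'.toNat : Int)) = 79 from rfl,
    show (('R'.toNat : Int)) = 82 from rfl, show (('Y'.toNat : Int)) = 89 from rfl,
    show (('T'.toNat : Int)) = 84 from rfl, show (('M'.toNat : Int)) = 77 from rfl]
  norm_num
  apply String.ext
  simp [PySem.Str.join, PySem.Chars.join_cons_cons, PySem.Chars.join_singleton]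

-- ===== VERDICT (by name: the statement is the Claim_ definition above) =====
theorem skrot_spec : Claim_equal_skrot := by
  intro w _
  exact skrot_eq w
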